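-- pv_equiv track=rewrite | github.com/gfernandf/agent-skills | tooling/skill_authoring.py | _find_best_source
-- ===== SOURCE A (Python) =====
-- def _find_best_source(
--     field_name: str,
--     expected_type: str,
--     available_vars: dict[str, str],
-- ) -> str | None:
--     """Find the best matching source variable for a capability input field."""
--     # Exact name match with correct type
--     for var, vtype in available_vars.items():
--         var_field = var.split(".")[-1]
--         if var_field == field_name and vtype == expected_type:
--             return var
--
--     # Partial name match with correct type
--     for var, vtype in available_vars.items():
--         var_field = var.split(".")[-1]
--         if vtype == expected_type and (field_name in var_field or var_field in field_name):
--             return var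
--
--     # Type match only — prefer most recent (last registered)
--     type_matches = [var for var, vtype in available_vars.items() if vtype == expected_type]
--     if type_matches:
--         return type_matches[-1]
--
--     return None
-- ===== SOURCE B (Python) =====
-- def _find_best_source(
--     field_name: str,
--     expected_type: str,
--     available_vars: dict[str, str],
-- ) -> str | None:
--     """Single pass: track first exact match, first partial match, last type match."""
--     first_exact = None
--     first_partial = None
--     last_type = None
--     for var, vtype in available_vars.items():
--         if vtype != expected_type:
--             continue
--         var_field = var.split(".")[-1]
--         if first_exact is None and var_field == field_name:
--             first_exact = var
--         if first_partial is None and (field_name in var_field or var_field in field_name):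
--             first_partial = var
--         last_type = var
--     if first_exact is not None:
--         return first_exact
--     if first_partial is not None:
--         return first_partial
--     return last_type
-- ===== Notes on version B (the rewrite author's own statement) =====
-- stated objective: simpler
-- what changed: Replaces A's three separate passes over the dict (exact-match scan, partial-match scan, type-match list build) with one loop maintaining first_exact, first_partial and last_type, picking among them at the end.
import Mathlib
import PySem

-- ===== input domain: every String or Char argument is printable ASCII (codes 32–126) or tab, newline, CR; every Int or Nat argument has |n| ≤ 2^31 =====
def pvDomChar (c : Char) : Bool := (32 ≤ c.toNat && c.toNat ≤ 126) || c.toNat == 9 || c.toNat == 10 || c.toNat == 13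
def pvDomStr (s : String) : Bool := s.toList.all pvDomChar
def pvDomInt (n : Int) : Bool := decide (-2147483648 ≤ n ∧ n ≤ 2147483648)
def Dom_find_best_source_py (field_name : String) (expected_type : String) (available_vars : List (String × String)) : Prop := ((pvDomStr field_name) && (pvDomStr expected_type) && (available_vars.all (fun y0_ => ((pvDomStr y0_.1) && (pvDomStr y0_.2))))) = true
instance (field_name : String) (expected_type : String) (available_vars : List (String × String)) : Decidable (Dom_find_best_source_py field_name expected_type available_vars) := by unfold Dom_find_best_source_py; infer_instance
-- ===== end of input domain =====

-- B replaces A's three passes over the dict by a single loop keeping the first exact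
-- match, the first partial match and the last type match (objective: simpler).

-- ===== PORT A =====
-- var.split(".")[-1]: "." is a nonempty separator so split? is always `some` of a
-- nonempty list; getD []/getLastD "" are never the default.
def pvVarField (var : String) : String := ((PySem.Str.split? var ".").getD []).getLastD ""

def find_best_source_py (field_name : String) (expected_type : String) (available_vars : List (String × String)) : Option String :=
  -- first loop: exact name match with correct type (return on first hit = find?)
  match available_vars.find? (fun p => pvVarField p.1 == field_name && p.2 == expected_type) with
  | some p => some p.1
  | none =>
    -- second loop: partial name match with correct type
    match available_vars.find? (fun p => p.2 == expected_type &&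
        (PySem.Str.isIn field_name (pvVarField p.1) || PySem.Str.isIn (pvVarField p.1) field_name)) with
    | some p => some p.1
    | none =>
      -- type matches only; prefer last registered
      let type_matches := (available_vars.filter (fun p => p.2 == expected_type)).map Prod.fst
      if type_matches.isEmpty then none else type_matches.getLast?

-- ===== PORT B =====
-- one loop iteration of Source B: state = (first_exact, first_partial, last_type)
def pvStep (field_name : String) (expected_type : String)
    (acc : Option String × Option String × Option String) (p : String × String) :
    Option String × Option String × Option String :=
  if p.2 != expected_type then acc
  else
    let vf := pvVarField p.1
    ((if acc.1.isNone && vf == field_name then some p.1 else acc.1),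
     (if acc.2.1.isNone && (PySem.Str.isIn field_name vf || PySem.Str.isIn vf field_name) then some p.1 else acc.2.1),
     some p.1)

def find_best_source_py_alt (field_name : String) (expected_type : String) (available_vars : List (String × String)) : Option String :=
  let st := available_vars.foldl (pvStep field_name expected_type) (none, none, none)
  if st.1.isSome then st.1
  else if st.2.1.isSome then st.2.1
  else st.2.2

-- ===== PRECONDITION & SPEC =====
def Spec_find_best_source_py (field_name : String) (expected_type : String) (available_vars : List (String × String)) (out : Option String) : Prop := out = find_best_source_py_alt field_name expected_type available_vars
instance (field_name : String) (expected_type : String) (available_vars : List (String × String)) (out : Option String) : Decidable (Spec_find_best_source_py field_name expected_type available_vars out) := by unfold Spec_find_best_source_py; infer_instance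

-- ===== CLAIM (what is proved, stated in full; the proofs are below) =====
def Claim_equal_find_best_source_py : Prop := ∀ (field_name : String) (expected_type : String) (available_vars : List (String × String)), Dom_find_best_source_py field_name expected_type available_vars → Spec_find_best_source_py field_name expected_type available_vars (find_best_source_py field_name expected_type available_vars)

-- ===== LEMMAS AND PROOFS =====

lemma pv_getLast?_cons {α : Type} (a : α) (xs : List α) :
    (a :: xs).getLast? = xs.getLast?.or (some a) := by
  induction xs with
  | nil => rfl
  | cons b t ih =>
    rw [List.getLast?_cons_cons]
    cases h : (b :: t).getLast? with
    | none => simp [List.getLast?_eq_none_iff] at h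
    | some v => rfl

lemma pv_find?_cons_eval {α : Type} (f : α → Bool) (a : α) (l : List α) :
    List.find? f (a :: l) = if f a then some a else List.find? f l := by
  cases h : f a
  · rw [List.find?_cons_of_neg (by simp [h]), if_neg (by simp [h])]
  · rw [List.find?_cons_of_pos h]; simp [h]

-- invariant of B's fold: the three state components are, respectively, the old value
-- or the first exact match, the old value or the first partial match, and the last
-- type match or the old value.
lemma pv_fold_spec (field_name expected_type : String) :
    ∀ (l : List (String × String)) (e pr t : Option String),
    l.foldl (pvStep field_name expected_type) (e, pr, t) =
      (e.or ((l.find? (fun p => pvVarField p.1 == field_name && p.2 == expected_type)).map Prod.fst),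
       pr.or ((l.find? (fun p => p.2 == expected_type &&
          (PySem.Str.isIn field_name (pvVarField p.1) || PySem.Str.isIn (pvVarField p.1) field_name))).map Prod.fst),
       (((l.filter (fun p => p.2 == expected_type)).map Prod.fst).getLast?).or t) := by
  intro l
  induction l with
  | nil => intro e pr t; simp
  | cons p l ih =>
    intro e pr t
    by_cases hpt : (p.2 == expected_type) = true
    · have hne : (p.2 != expected_type) = false := by simp [bne_iff_ne, eq_of_beq hpt]
      have hstep : pvStep field_name expected_type (e, pr, t) p =
        ((if e.isNone && pvVarField p.1 == field_name then some p.1 else e),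
         (if pr.isNone && (PySem.Str.isIn field_name (pvVarField p.1) || PySem.Str.isIn (pvVarField p.1) field_name) then some p.1 else pr),
         some p.1) := by
        simp only [pvStep, hne, Bool.false_eq_true, if_false]
      rw [List.foldl_cons, hstep, ih, pv_find?_cons_eval, pv_find?_cons_eval, List.filter_cons]
      refine Prod.ext ?_ (Prod.ext ?_ ?_)
      · cases hx : (pvVarField p.1 == field_name) <;> cases e <;> simp [hx, hpt]
      · cases hx : (PySem.Str.isIn field_name (pvVarField p.1) || PySem.Str.isIn (pvVarField p.1) field_name) <;>
          cases pr <;> simp [hx, hpt]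
      · simp [hpt, pv_getLast?_cons, Option.or_assoc]
    · have hne : (p.2 != expected_type) = true := bne_iff_ne.mpr (fun h => hpt (beq_of_eq h))
      have hstep : pvStep field_name expected_type (e, pr, t) p = (e, pr, t) := by
        simp only [pvStep, hne, if_true]
      rw [List.foldl_cons, hstep, ih, pv_find?_cons_eval, pv_find?_cons_eval, List.filter_cons]
      simp [hpt]

-- ===== VERDICT (by name: the statement is the Claim_ definition above) =====
theorem find_best_source_py_spec : Claim_equal_find_best_source_py := by
  intro field_name expected_type available_vars _
  unfold Spec_find_best_source_py find_best_source_py find_best_source_py_alt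
  rw [pv_fold_spec]
  simp only [Option.none_or, Option.or_none]
  cases hE : available_vars.find? (fun p => pvVarField p.1 == field_name && p.2 == expected_type) with
  | some q => simp
  | none =>
    simp only [Option.map_none, Option.isSome_none, Bool.false_eq_true, if_false]
    cases hP : available_vars.find? (fun p => p.2 == expected_type &&
        (PySem.Str.isIn field_name (pvVarField p.1) || PySem.Str.isIn (pvVarField p.1) field_name)) with
    | some q => simp
    | none =>
      simp only [Option.map_none, Option.isSome_none, Bool.false_eq_true, if_false]
      cases h : (available_vars.filter (fun p => p.2 == expected_type)).map Prod.fst with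
      | nil => simp
      | cons a t => simp
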